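-- pv_equiv track=rewrite | github.com/ninjacoder88/lifx-lan-py | src/EndianConverter.py | convert
-- ===== SOURCE A (Python) =====
-- def convert(binary_string):
--     swapped_string = ""
--     temp = binary_string
--
--     while(len(temp) > 0):
--         first_byte = temp[0:8]
--         second_byte = temp[8:16]
--
--         swapped_string += second_byte
--         swapped_string += first_byte
--
--         temp = temp[16:]
--
--     return swapped_string
-- ===== SOURCE B (Python) =====
-- def convert(binary_string):
--     blocks = []
--     i = 0
--     while i < len(binary_string):
--         blocks.append(binary_string[i:i+8])
--         i += 8
--     out = []
--     k = 0
--     while k + 1 < len(blocks):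
--         out.append(blocks[k + 1])
--         out.append(blocks[k])
--         k += 2
--     if k < len(blocks):
--         out.append(blocks[k])
--     return "".join(out)
-- ===== Notes on version B (the rewrite author's own statement) =====
-- stated objective: faster
-- what changed: B materialises the uniform list of 8-char blocks by index (no shrinking-tail slices), then swaps adjacent blocks pairwise in a second index-based pass and joins once, instead of A's single while-loop that repeatedly slices the remaining string (temp = temp[16:]) and concatenates onto an accumulator string.
import Mathlib
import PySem

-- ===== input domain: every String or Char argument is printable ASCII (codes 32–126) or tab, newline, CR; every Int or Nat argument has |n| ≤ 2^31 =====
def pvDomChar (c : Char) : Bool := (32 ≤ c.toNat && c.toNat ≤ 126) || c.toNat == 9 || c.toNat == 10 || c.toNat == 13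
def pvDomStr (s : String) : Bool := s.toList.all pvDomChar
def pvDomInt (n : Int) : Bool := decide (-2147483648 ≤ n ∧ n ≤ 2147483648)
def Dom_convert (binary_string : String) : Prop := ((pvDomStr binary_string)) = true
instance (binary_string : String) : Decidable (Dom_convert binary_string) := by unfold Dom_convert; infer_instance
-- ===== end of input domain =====

-- B materialises the uniform list of 8-char blocks with an index loop, then swaps adjacent
-- blocks pairwise in a second index-based pass and joins once (avoids A's repeated
-- string-slicing/concatenation of the remaining tail).

-- ===== PORT A =====
-- A's while loop: swapped += temp[8:16]; swapped += temp[0:8]; temp = temp[16:]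
def convertLoop (swapped : List Char) (temp : List Char) : List Char :=
  if 0 < temp.length then
    let first_byte := PySem.List.slice temp (some 0) (some 8)
    let second_byte := PySem.List.slice temp (some 8) (some 16)
    convertLoop ((swapped ++ second_byte) ++ first_byte) (PySem.List.slice temp (some 16) none)
  else swapped
termination_by temp.length
decreasing_by
  have : PySem.List.slice temp (some 16) none = temp.drop 16 := by
    simpa using PySem.List.slice_from (xs := temp) (a := 16) (by norm_num)
  simp [this]; omega

def convert (binary_string : String) : String :=
  String.ofList (convertLoop [] binary_string.toList)

-- ===== PORT B =====
-- first while loop of Source B: blocks.append(binary_string[i:i+8]); i += 8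
-- (the counters i and k only take nonnegative values in Source B, so they are ported as Nat)
def mkBlocks (cs : List Char) (i : Nat) (blocks : List (List Char)) : List (List Char) :=
  if i < cs.length then
    mkBlocks cs (i + 8) (blocks ++ [PySem.List.slice cs (some (i : Int)) (some ((i : Int) + 8))])
  else blocks
termination_by cs.length - i

-- second while loop of Source B plus the trailing 'if k < len(blocks)'
def swapPass (blocks : List (List Char)) (out : List (List Char)) (k : Nat) : List (List Char) :=
  if k + 1 < blocks.length then
    swapPass blocks ((out ++ [PySem.List.pyGetD blocks ((k : Int) + 1) []]) ++ [PySem.List.pyGetD blocks (k : Int) []]) (k + 2)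
  else if k < blocks.length then out ++ [PySem.List.pyGetD blocks (k : Int) []]
  else out
termination_by blocks.length - k

-- "".join(out)
def convert_alt (binary_string : String) : String :=
  String.ofList (swapPass (mkBlocks binary_string.toList 0 []) [] 0).flatten

-- ===== PRECONDITION & SPEC =====
def Spec_convert (binary_string : String) (out : String) : Prop := out = convert_alt binary_string
instance (binary_string : String) (out : String) : Decidable (Spec_convert binary_string out) := by unfold Spec_convert; infer_instance

-- ===== CLAIM (what is proved, stated in full; the proofs are below) =====
def Claim_equal_convert : Prop := ∀ (binary_string : String), Dom_convert binary_string → Spec_convert binary_string (convert binary_string)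

-- ===== LEMMAS AND PROOFS =====

-- proof-side spec: the list of 8-char chunks of cs
def pvChunks (cs : List Char) : List (List Char) :=
  if cs = [] then [] else cs.take 8 :: pvChunks (cs.drop 8)
termination_by cs.length
decreasing_by
  rename_i h
  have : 0 < cs.length := List.length_pos_iff.mpr h
  simp; omega

-- proof-side spec: swap adjacent blocks pairwise
def pvSwap : List (List Char) → List (List Char)
  | b1 :: b2 :: rest => b2 :: b1 :: pvSwap rest
  | bs => bs

theorem pv_slice_nat (xs : List Char) (a b : Nat) :
    PySem.List.slice xs (some (a : Int)) (some (b : Int)) = (xs.drop a).take (b - a) :=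
  PySem.List.slice_natCast xs a b

theorem pv_getD_nat (blocks : List (List Char)) (k : Nat) :
    PySem.List.pyGetD blocks (k : Int) [] = (blocks.drop k).headD [] := by
  rw [PySem.List.pyGetD_natCast]
  cases h : blocks.drop k with
  | nil =>
    have hk : blocks.length ≤ k := by
      by_contra hlt
      have := List.drop_eq_nil_iff.mp h
      omega
    simp [List.getD, List.getElem?_eq_none hk]
  | cons x xs =>
    have hk : k < blocks.length := by
      by_contra hge
      rw [List.drop_eq_nil_of_le (by omega)] at h
      simp at h
    have : blocks[k]? = some x := by
      have h0 : (blocks.drop k)[0]? = blocks[k + 0]? := List.getElem?_drop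
      rw [h] at h0
      simpa using h0.symm
    simp [List.getD, this]

theorem pv_mkBlocks_eq (cs : List Char) (i : Nat) (acc : List (List Char)) :
    mkBlocks cs i acc = acc ++ pvChunks (cs.drop i) := by
  fun_induction mkBlocks cs i acc with
  | case1 i acc h ih =>
    rw [ih]
    have hslice : PySem.List.slice cs (some (i : Int)) (some ((i : Int) + 8))
        = (cs.drop i).take 8 := by
      have := pv_slice_nat cs i (i + 8)
      push_cast at this
      simpa using this
    have hne : cs.drop i ≠ [] := by
      intro he
      have := List.drop_eq_nil_iff.mp he
      omega
    conv_rhs => rw [pvChunks, if_neg hne]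
    rw [hslice, ← List.drop_drop]
    simp
  | case2 i acc h =>
    have : cs.drop i = [] := List.drop_eq_nil_of_le (by omega)
    simp [this, pvChunks]

theorem pv_swapPass_eq (blocks : List (List Char)) (out : List (List Char)) (k : Nat) :
    swapPass blocks out k = out ++ pvSwap (blocks.drop k) := by
  fun_induction swapPass blocks out k with
  | case1 out k h ih =>
    rw [ih]
    have hd : blocks.drop k = (blocks.drop k).headD [] :: ((blocks.drop (k+1)).headD [] :: blocks.drop (k+2)) := by
      cases hdk : blocks.drop k with
      | nil =>
        have := List.drop_eq_nil_iff.mp hdk; omega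
      | cons x xs =>
        cases hxs : xs with
        | nil =>
          have h1 : blocks.length - k = 1 := by
            have := congrArg List.length hdk
            simp [hxs] at this
            omega
          omega
        | cons y ys =>
          have h1 : blocks.drop (k+1) = y :: ys := by
            have := List.drop_drop (l := blocks) (i := 1) (j := k)
            rw [hdk, hxs] at this
            simpa [Nat.add_comm] using this.symm
          have h2 : blocks.drop (k+2) = ys := by
            have := List.drop_drop (l := blocks) (i := 2) (j := k)
            rw [hdk, hxs] at this
            simpa [Nat.add_comm] using this.symm
          simp [h1, h2]
    have hcast : ((k : Int) + 1) = ((k + 1 : Nat) : Int) := by push_cast; ring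
    rw [hcast, pv_getD_nat, pv_getD_nat]
    conv_rhs => rw [hd]
    simp [pvSwap]
  | case2 out k h1 h2 =>
    have hd : blocks.drop k = [(blocks.drop k).headD []] := by
      cases hdk : blocks.drop k with
      | nil =>
        have := List.drop_eq_nil_iff.mp hdk; omega
      | cons x xs =>
        have := congrArg List.length hdk
        simp at this
        have hlen : xs.length = 0 := by omega
        simp [List.length_eq_zero_iff.mp hlen]
    rw [pv_getD_nat]
    conv_rhs => rw [hd]
    simp [pvSwap]
  | case3 out k h1 h2 =>
    have : blocks.drop k = [] := List.drop_eq_nil_of_le (by omega)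
    simp [this, pvSwap]

theorem pv_loop_eq (temp swapped : List Char) :
    convertLoop swapped temp = swapped ++ (pvSwap (pvChunks temp)).flatten := by
  fun_induction convertLoop swapped temp with
  | case1 swapped temp h first second ih =>
    rw [ih]
    have h16 : PySem.List.slice temp (some 16) none = temp.drop 16 := by
      simpa using PySem.List.slice_from (xs := temp) (a := 16) (by norm_num)
    have h8 : PySem.List.slice temp (some 8) none = temp.drop 8 := by
      simpa using PySem.List.slice_from (xs := temp) (a := 8) (by norm_num)
    have hfirst : first = temp.take 8 := by
      simpa using pv_slice_nat temp 0 8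
    have hsecond : second = (temp.drop 8).take 8 := by
      have := pv_slice_nat temp 8 16
      norm_num at this
      simpa [second] using this
    have hne : temp ≠ [] := by intro he; simp [he] at h
    rw [h16] at *
    conv_rhs => rw [pvChunks, if_neg hne]
    by_cases hd : temp.drop 8 = []
    · have htake : temp.take 8 = temp := by
        have : temp.length ≤ 8 := by
          have := List.drop_eq_nil_iff.mp hd
          omega
        exact List.take_of_length_le this
      have hd16 : temp.drop 16 = [] := by
        have : temp.length ≤ 8 := by
          have := List.drop_eq_nil_iff.mp hd
          omega
        apply List.drop_eq_nil_iff.mpr; omega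
      simp [pvChunks, hd, pvSwap, hfirst, hsecond, htake, hd16]
    · conv_rhs => rw [pvChunks, if_neg hd]
      have hdd : (temp.drop 8).drop 8 = temp.drop 16 := by
        rw [List.drop_drop]
      simp [pvSwap, hfirst, hsecond, hdd]
  | case2 swapped temp h =>
    have : temp = [] := by
      cases temp with
      | nil => rfl
      | cons x xs => simp at h
    subst this
    simp [pvChunks, pvSwap]

-- ===== VERDICT (by name: the statement is the Claim_ definition above) =====
theorem convert_spec : Claim_equal_convert := by
  intro s _
  unfold Spec_convert convert convert_alt
  rw [pv_loop_eq, pv_mkBlocks_eq, pv_swapPass_eq]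
  simp
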